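-- pv_equiv track=rewrite | github.com/yixuanzhou/End-to-End-Audio-Recognition | audio_filter.py | read_seg_points
-- ===== SOURCE A (Python) =====
-- def read_seg_points(audio_step, window_size):
--     time_steps, seg_points = [], []
--     flag = audio_step[0]
--     count = 1
--     max_step = 7
--     time_stamp = 0
--     for i in range(1,len(audio_step)):
--         if audio_step[i] == flag and count < max_step:
--             count += 1
--         else:
--             time_steps.append([time_stamp,time_stamp+window_size*count, flag])
--             flag = audio_step[i]
--             time_stamp += window_size * count
--             count = 1
--     time_steps.append([time_stamp,time_stamp+window_size*count, flag])
--     return time_steps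
--     '''for step in time_steps:
--         if step[0] == 1:
--             seg_points.append(step[1:])
--     return seg_points'''
-- ===== SOURCE B (Python) =====
-- def read_seg_points(audio_step, window_size):
--     # Phase 1: run-length encode audio_step (raises IndexError on [] like A).
--     runs = []
--     prev = audio_step[0]
--     n = 1
--     for x in audio_step[1:]:
--         if x == prev:
--             n += 1
--         else:
--             runs.append((prev, n))
--             prev, n = x, 1
--     runs.append((prev, n))
--     # Phase 2: split each run into chunks of at most 7 and emit intervals.
--     out = []
--     t = 0
--     for v, length in runs:
--         q, r = divmod(length, 7)
--         for c in [7] * q + ([r] if r else []):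
--             out.append([t, t + window_size * c, v])
--             t += window_size * c
--     return out
-- ===== Notes on version B (the rewrite author's own statement) =====
-- stated objective: simpler
-- what changed: Replaced A's single fused loop with mutable flag/count/time_stamp state capped at 7 by two clear phases: run-length encode the list, then split each run into chunks via divmod(length, 7) and emit one interval per chunk.
import Mathlib
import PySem

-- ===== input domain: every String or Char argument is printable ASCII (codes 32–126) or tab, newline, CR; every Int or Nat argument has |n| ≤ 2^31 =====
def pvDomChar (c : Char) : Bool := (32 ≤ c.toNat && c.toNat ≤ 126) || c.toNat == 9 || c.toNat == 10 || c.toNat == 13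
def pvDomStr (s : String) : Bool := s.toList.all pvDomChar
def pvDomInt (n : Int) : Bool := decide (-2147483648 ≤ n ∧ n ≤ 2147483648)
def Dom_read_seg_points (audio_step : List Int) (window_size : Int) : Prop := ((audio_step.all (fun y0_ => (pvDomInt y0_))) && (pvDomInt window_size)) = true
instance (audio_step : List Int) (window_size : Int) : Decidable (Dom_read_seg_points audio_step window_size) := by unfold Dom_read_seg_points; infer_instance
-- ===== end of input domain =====

-- B replaces A's fused capped-count loop by run-length encoding followed by divmod chunking (objective: simpler two-phase decomposition).

-- ===== PORT A =====
-- A's loop 'for i in range(1, len(audio_step))' reads audio_step[i] only, i.e. it walks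
-- the tail of the list; it is ported as a foldl over that tail with the same state tuple
-- (time_steps, flag, count, time_stamp). audio_step[0] raises IndexError on [] (Pre_).
def read_seg_points (audio_step : List Int) (window_size : Int) : List (List Int) :=
  match audio_step with
  | [] => []  -- Python raises IndexError here; excluded by Pre_read_seg_points
  | a0 :: rest =>
    let st := rest.foldl
      (fun (st : List (List Int) × Int × Int × Int) x =>
        let (time_steps, flag, count, time_stamp) := st
        if x = flag ∧ count < 7 then
          (time_steps, flag, count + 1, time_stamp)
        else
          (time_steps ++ [[time_stamp, time_stamp + window_size * count, flag]],
           x, 1, time_stamp + window_size * count))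
      ([], a0, 1, 0)
    st.1 ++ [[st.2.2.2, st.2.2.2 + window_size * st.2.2.1, st.2.1]]

-- ===== PORT B =====
def read_seg_points_alt (audio_step : List Int) (window_size : Int) : List (List Int) :=
  match audio_step with
  | [] => []  -- Source B raises IndexError here too (audio_step[0]); excluded by Pre_read_seg_points
  | a0 :: rest =>
    -- Phase 1: run-length encode
    let st := rest.foldl
      (fun (st : List (Int × Int) × Int × Int) x =>
        let (runs, prev, n) := st
        if x = prev then (runs, prev, n + 1) else (runs ++ [(prev, n)], x, 1))
      ([], a0, 1)
    let runs := st.1 ++ [(st.2.1, st.2.2)]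
    -- Phase 2: divmod each run into chunks of at most 7 and emit intervals
    let out := runs.foldl
      (fun (st : List (List Int) × Int) vl =>
        let q := PySem.Int.floordiv vl.2 7
        let r := PySem.Int.mod vl.2 7
        let chunks := List.replicate q.toNat 7 ++ (if r ≠ 0 then [r] else [])
        chunks.foldl
          (fun (st : List (List Int) × Int) c =>
            (st.1 ++ [[st.2, st.2 + window_size * c, vl.1]], st.2 + window_size * c))
          st)
      ([], 0)
    out.1

-- ===== PRECONDITION & SPEC =====
-- Both programs evaluate audio_step[0]: on the empty list Python raises IndexError, so it is excluded.
def Pre_read_seg_points (audio_step : List Int) (window_size : Int) : Prop := audio_step ≠ []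
instance (audio_step : List Int) (window_size : Int) : Decidable (Pre_read_seg_points audio_step window_size) := by unfold Pre_read_seg_points; infer_instance
def pvWitness_read_seg_points : List Int × Int := ([1, 1, 0], 2)

def Spec_read_seg_points (audio_step : List Int) (window_size : Int) (out : List (List Int)) : Prop := out = read_seg_points_alt audio_step window_size
instance (audio_step : List Int) (window_size : Int) (out : List (List Int)) : Decidable (Spec_read_seg_points audio_step window_size out) := by unfold Spec_read_seg_points; infer_instance

-- ===== CLAIM (what is proved, stated in full; the proofs are below) =====
def Claim_equal_read_seg_points : Prop := ∀ (audio_step : List Int) (window_size : Int), Dom_read_seg_points audio_step window_size → Pre_read_seg_points audio_step window_size → Spec_read_seg_points audio_step window_size (read_seg_points audio_step window_size)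

-- ===== LEMMAS AND PROOFS =====

-- Recursive form of A's loop (returns the segments emitted from state (flag,count,stamp) on).
def aRun (w : Int) : List Int → Int → Int → Int → List (List Int)
  | [], flag, count, stamp => [[stamp, stamp + w * count, flag]]
  | x :: xs, flag, count, stamp =>
    if x = flag ∧ count < 7 then aRun w xs flag (count + 1) stamp
    else [stamp, stamp + w * count, flag] :: aRun w xs x 1 (stamp + w * count)

-- Recursive form of B's phase 1.
def rleRuns : List Int → Int → Int → List (Int × Int)
  | [], prev, n => [(prev, n)]
  | x :: xs, prev, n =>
    if x = prev then rleRuns xs prev (n + 1) else (prev, n) :: rleRuns xs x 1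

-- B's chunk list for one run length.
def chunksOf (l : Int) : List Int :=
  List.replicate (PySem.Int.floordiv l 7).toNat 7 ++
    (if PySem.Int.mod l 7 ≠ 0 then [PySem.Int.mod l 7] else [])

-- Recursive form of B's inner chunk loop.
def emitC (w v : Int) : List Int → Int → List (List Int)
  | [], _ => []
  | c :: cs, t => [t, t + w * c, v] :: emitC w v cs (t + w * c)

-- Recursive form of B's phase 2.
def bEmit (w : Int) : List (Int × Int) → Int → List (List Int)
  | [], _ => []
  | (v, l) :: rs, t => emitC w v (chunksOf l) t ++ bEmit w rs (t + w * (chunksOf l).sum)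

theorem aRun_foldl (w : Int) (xs : List Int) (acc : List (List Int)) (flag count stamp : Int) :
    (let st := xs.foldl
      (fun (st : List (List Int) × Int × Int × Int) x =>
        let (time_steps, flag, count, time_stamp) := st
        if x = flag ∧ count < 7 then
          (time_steps, flag, count + 1, time_stamp)
        else
          (time_steps ++ [[time_stamp, time_stamp + w * count, flag]],
           x, 1, time_stamp + w * count))
      (acc, flag, count, stamp)
     st.1 ++ [[st.2.2.2, st.2.2.2 + w * st.2.2.1, st.2.1]]) =
    acc ++ aRun w xs flag count stamp := by
  induction xs generalizing acc flag count stamp with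
  | nil => simp [aRun]
  | cons x xs ih =>
    simp only [List.foldl_cons, aRun]
    by_cases h : x = flag ∧ count < 7
    · simp only [if_pos h]; exact ih acc flag (count + 1) stamp
    · simp only [if_neg h]
      rw [ih]
      simp

theorem rle_foldl (xs : List Int) (acc : List (Int × Int)) (prev n : Int) :
    (let st := xs.foldl
      (fun (st : List (Int × Int) × Int × Int) x =>
        let (runs, prev, n) := st
        if x = prev then (runs, prev, n + 1) else (runs ++ [(prev, n)], x, 1))
      (acc, prev, n)
     st.1 ++ [(st.2.1, st.2.2)]) = acc ++ rleRuns xs prev n := by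
  induction xs generalizing acc prev n with
  | nil => simp [rleRuns]
  | cons x xs ih =>
    simp only [List.foldl_cons, rleRuns]
    by_cases h : x = prev
    · simp only [if_pos h]; exact ih acc prev (n + 1)
    · simp only [if_neg h]
      rw [ih]
      simp

theorem emitC_foldl (w v : Int) (cs : List Int) (out : List (List Int)) (t : Int) :
    cs.foldl
      (fun (st : List (List Int) × Int) c =>
        (st.1 ++ [[st.2, st.2 + w * c, v]], st.2 + w * c)) (out, t) =
    (out ++ emitC w v cs t, t + w * cs.sum) := by
  induction cs generalizing out t with
  | nil => simp [emitC]
  | cons c cs ih =>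
    simp only [List.foldl_cons, emitC]
    rw [ih]
    simp only [List.append_assoc, List.cons_append, List.nil_append, List.sum_cons, Prod.mk.injEq]
    exact ⟨trivial, by ring⟩

theorem bEmit_foldl (w : Int) (rs : List (Int × Int)) (out : List (List Int)) (t : Int) :
    (rs.foldl
      (fun (st : List (List Int) × Int) vl =>
        let q := PySem.Int.floordiv vl.2 7
        let r := PySem.Int.mod vl.2 7
        let chunks := List.replicate q.toNat 7 ++ (if r ≠ 0 then [r] else [])
        chunks.foldl
          (fun (st : List (List Int) × Int) c =>
            (st.1 ++ [[st.2, st.2 + w * c, vl.1]], st.2 + w * c))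
          st)
      (out, t)).1 = out ++ bEmit w rs t := by
  induction rs generalizing out t with
  | nil => simp [bEmit]
  | cons vl rs ih =>
    obtain ⟨v, l⟩ := vl
    simp only [List.foldl_cons, bEmit]
    rw [show (List.replicate (PySem.Int.floordiv l 7).toNat 7 ++
        (if PySem.Int.mod l 7 ≠ 0 then [PySem.Int.mod l 7] else [])) = chunksOf l from rfl]
    rw [emitC_foldl, ih]
    simp

-- chunks of a small run (1 ≤ l ≤ 7) form a single chunk [l]
theorem chunksOf_small (l : Int) (h1 : 1 ≤ l) (h7 : l ≤ 7) : chunksOf l = [l] := by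
  interval_cases l <;> decide

-- adding 7 to a positive length prepends one full chunk
theorem chunksOf_add_seven (l : Int) (h : 1 ≤ l) : chunksOf (l + 7) = 7 :: chunksOf l := by
  have hd : PySem.Int.floordiv (l + 7) 7 = PySem.Int.floordiv l 7 + 1 := by
    rw [PySem.Int.floordiv_eq_iff_of_pos (by omega)]
    have h2 := PySem.Int.floordiv_mul_add_mod l 7
    have h3 := PySem.Int.mod_nonneg l (b := 7) (by omega)
    have h4 := PySem.Int.mod_lt l (b := 7) (by omega)
    omega
  have hm : PySem.Int.mod (l + 7) 7 = PySem.Int.mod l 7 := by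
    have h2 := PySem.Int.floordiv_mul_add_mod l 7
    have h5 := PySem.Int.floordiv_mul_add_mod (l + 7) 7
    omega
  have hq : 0 ≤ PySem.Int.floordiv l 7 := by
    have h2 := PySem.Int.floordiv_mul_add_mod l 7
    have h4 := PySem.Int.mod_lt l (b := 7) (by omega)
    nlinarith [PySem.Int.mod_nonneg l (b := 7) (by omega : (0:Int) < 7)]
  unfold chunksOf
  rw [hd, hm]
  rw [show (PySem.Int.floordiv l 7 + 1).toNat = (PySem.Int.floordiv l 7).toNat + 1 by omega]
  simp [List.replicate_succ]

-- the head run of rleRuns carries the starting count additively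
theorem rle_shift (xs : List Int) (prev : Int) :
    ∃ l rs, 0 ≤ l ∧ ∀ m : Int, rleRuns xs prev m = (prev, m + l) :: rs := by
  induction xs generalizing prev with
  | nil => exact ⟨0, [], le_refl 0, fun m => by simp [rleRuns]⟩
  | cons x xs ih =>
    by_cases h : x = prev
    · obtain ⟨l, rs, hl, hrec⟩ := ih prev
      refine ⟨l + 1, rs, by omega, fun m => ?_⟩
      rw [show rleRuns (x :: xs) prev m = rleRuns xs prev (m + 1) by simp [rleRuns, h]]
      rw [hrec (m + 1)]
      ring_nf
    · exact ⟨0, rleRuns xs x 1, le_refl 0,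
        fun m => by simp [rleRuns, h]⟩

-- core: A's capped-count emission equals B's run/chunk emission
theorem aRun_eq_bEmit (w : Int) (xs : List Int) (flag count stamp : Int)
    (h1 : 1 ≤ count) (h7 : count ≤ 7) :
    aRun w xs flag count stamp = bEmit w (rleRuns xs flag count) stamp := by
  induction xs generalizing flag count stamp with
  | nil =>
    simp [aRun, rleRuns, bEmit, chunksOf_small count h1 h7, emitC]
  | cons x xs ih =>
    by_cases h : x = flag ∧ count < 7
    · rw [show aRun w (x :: xs) flag count stamp = aRun w xs flag (count + 1) stamp by
        simp [aRun, if_pos h]]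
      rw [show rleRuns (x :: xs) flag count = rleRuns xs flag (count + 1) by
        simp [rleRuns, h.1]]
      exact ih flag (count + 1) stamp (by omega) (by omega)
    · by_cases hx : x = flag
      · -- count = 7: emit a full chunk, same flag continues
        have hc : count = 7 := by omega
        subst hc
        rw [show aRun w (x :: xs) flag 7 stamp =
            [stamp, stamp + w * 7, flag] :: aRun w xs x 1 (stamp + w * 7) by
          simp [aRun]]
        rw [show rleRuns (x :: xs) flag 7 = rleRuns xs flag 8 by simp [rleRuns, hx]]
        obtain ⟨l, rs, hl, hrec⟩ := rle_shift xs flag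
        rw [hrec 8]
        rw [show (8 : Int) + l = (1 + l) + 7 by ring]
        rw [show bEmit w ((flag, 1 + l + 7) :: rs) stamp =
            emitC w flag (chunksOf (1 + l + 7)) stamp ++
              bEmit w rs (stamp + w * (chunksOf (1 + l + 7)).sum) from rfl]
        rw [chunksOf_add_seven (1 + l) (by omega)]
        rw [show emitC w flag (7 :: chunksOf (1 + l)) stamp =
            [stamp, stamp + w * 7, flag] :: emitC w flag (chunksOf (1 + l)) (stamp + w * 7)
            from rfl]
        have hsum : (7 :: chunksOf (1 + l)).sum = 7 + (chunksOf (1 + l)).sum := by simp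
        rw [hsum]
        have := ih x 1 (stamp + w * 7) (by omega) (by omega)
        rw [hx] at this ⊢
        rw [this, hrec 1]
        rw [show bEmit w ((flag, 1 + l) :: rs) (stamp + w * 7) =
            emitC w flag (chunksOf (1 + l)) (stamp + w * 7) ++
              bEmit w rs (stamp + w * 7 + w * (chunksOf (1 + l)).sum) from rfl]
        simp only [List.cons_append]
        congr 2
        ring
      · -- new value: run boundary
        rw [show aRun w (x :: xs) flag count stamp =
            [stamp, stamp + w * count, flag] :: aRun w xs x 1 (stamp + w * count) by
          simp [aRun, h]]
        rw [show rleRuns (x :: xs) flag count = (flag, count) :: rleRuns xs x 1 by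
          simp [rleRuns, hx]]
        rw [show bEmit w ((flag, count) :: rleRuns xs x 1) stamp =
            emitC w flag (chunksOf count) stamp ++
              bEmit w (rleRuns xs x 1) (stamp + w * (chunksOf count).sum) from rfl]
        rw [chunksOf_small count h1 h7]
        rw [ih x 1 (stamp + w * count) (by omega) (by omega)]
        simp [emitC]

-- ===== VERDICT (by name: the statement is the Claim_ definition above) =====
theorem read_seg_points_spec : Claim_equal_read_seg_points := by
  intro audio_step window_size _ hpre
  unfold Spec_read_seg_points
  match audio_step with
  | [] => exact absurd rfl hpre
  | a0 :: rest =>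
    show _ = read_seg_points_alt (a0 :: rest) window_size
    unfold read_seg_points read_seg_points_alt
    simp only
    rw [aRun_foldl window_size rest [] a0 1 0]
    have h1 := rle_foldl rest [] a0 1
    simp only [List.nil_append] at h1
    have h2 := bEmit_foldl window_size (rleRuns rest a0 1) [] 0
    rw [show (rest.foldl
        (fun (st : List (Int × Int) × Int × Int) x =>
          if x = st.2.1 then (st.1, st.2.1, st.2.2 + 1) else (st.1 ++ [(st.2.1, st.2.2)], x, 1))
        ([], a0, 1)).1 ++
        [((rest.foldl
          (fun (st : List (Int × Int) × Int × Int) x =>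
            if x = st.2.1 then (st.1, st.2.1, st.2.2 + 1) else (st.1 ++ [(st.2.1, st.2.2)], x, 1))
          ([], a0, 1)).2.1,
          (rest.foldl
          (fun (st : List (Int × Int) × Int × Int) x =>
            if x = st.2.1 then (st.1, st.2.1, st.2.2 + 1) else (st.1 ++ [(st.2.1, st.2.2)], x, 1))
          ([], a0, 1)).2.2)] = rleRuns rest a0 1 from h1]
    rw [h2]
    simp only [List.nil_append]
    exact aRun_eq_bEmit window_size rest a0 1 0 (by omega) (by omega)
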